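-- pv_equiv track=rewrite | github.com/Rachel-3/2024-Algorithm-Study | chaerim/Programmers/Level_1/Lv1_대충_만든_자판.py | solution
-- ===== SOURCE A (Python) =====
-- def solution(keymap, targets):
--     answer = []
--
--     index = {}
--     for key in keymap:
--         for key_index, key_char in enumerate(key):
--             if key_char not in index or key_index < index[key_char]:
--                 index[key_char] = key_index + 1
--
--     for target in targets:
--         count = 0
--         for target_char in target:
--             if target_char in index:
--                 count += index[target_char]
--             else:
--                 count = 0
--                 break
--
--         if count == 0:
--             answer.append(-1)
--         else:
--             answer.append(count)
--
--     return answer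
-- ===== SOURCE B (Python) =====
-- def solution(keymap, targets):
--     def cost(c):
--         positions = [key.index(c) + 1 for key in keymap if c in key]
--         return min(positions) if positions else None
--     answer = []
--     for target in targets:
--         costs = [cost(c) for c in target]
--         if not costs or None in costs:
--             answer.append(-1)
--         else:
--             answer.append(sum(costs))
--     return answer
-- ===== Notes on version B (the rewrite author's own statement) =====
-- stated objective: alternative
-- what changed: Replaced A's precomputed char->min-position dict (built once over all keymap occurrences, then O(1) lookups) by a direct per-character scan: each target character is priced as the minimum of key.index(c)+1 over the keys containing c, with no index structure at all.
import Mathlib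
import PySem

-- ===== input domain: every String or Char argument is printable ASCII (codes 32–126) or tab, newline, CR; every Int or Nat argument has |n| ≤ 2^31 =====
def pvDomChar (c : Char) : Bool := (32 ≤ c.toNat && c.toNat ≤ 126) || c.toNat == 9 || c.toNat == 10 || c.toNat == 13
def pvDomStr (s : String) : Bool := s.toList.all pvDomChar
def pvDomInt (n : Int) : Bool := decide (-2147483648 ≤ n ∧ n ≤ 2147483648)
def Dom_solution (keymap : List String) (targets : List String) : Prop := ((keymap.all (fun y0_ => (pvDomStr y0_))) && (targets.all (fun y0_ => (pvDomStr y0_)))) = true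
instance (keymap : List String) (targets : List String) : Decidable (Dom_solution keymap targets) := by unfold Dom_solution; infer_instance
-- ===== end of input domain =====

-- B drops A's precomputed min-position dict: each target character is priced by a direct
-- scan of keymap (min of key.index(c)+1 over keys containing c); objective: alternative.

-- ===== PORT A =====
-- inner dict-building step for one (key_index, key_char) pair
def stepA (d : PySem.Dict Char Int) (p : Int × Char) : PySem.Dict Char Int :=
  match d.get? p.2 with
  | none => d.insert p.2 (p.1 + 1)
  | some v => if p.1 < v then d.insert p.2 (p.1 + 1) else d

-- 'for key_index, key_char in enumerate(key): …'
def buildKeyA (d : PySem.Dict Char Int) (key : String) : PySem.Dict Char Int :=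
  (PySem.List.enumerate key.toList).foldl stepA d

-- 'for target_char in target: …' with the break (count = 0)
def countA (d : PySem.Dict Char Int) : List Char → Int → Int
  | [], acc => acc
  | c :: cs, acc =>
    match d.get? c with
    | some v => countA d cs (acc + v)
    | none => 0

def solution (keymap : List String) (targets : List String) : List Int :=
  let index : PySem.Dict Char Int := keymap.foldl buildKeyA PySem.Dict.empty
  targets.foldl (fun answer target =>
    let count := countA index target.toList 0
    if count = 0 then answer ++ [-1] else answer ++ [count]) []

-- ===== PORT B =====
-- cost(c): [key.index(c) + 1 for key in keymap if c in key], min or None.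
-- key.index(c) is ported via PySem.List.index?/getD; exact because the filter guarantees c ∈ key.
def costB (keymap : List String) (c : Char) : Option Int :=
  let positions : List Int := (keymap.filter (fun key => key.toList.contains c)).map
    (fun key => ((PySem.List.index? key.toList c).getD 0 : Int) + 1)
  PySem.List.min? positions (fun x => x)

-- sum(costs) is ported via Option.getD 0; exact because that branch guarantees no None in costs.
def solution_alt (keymap : List String) (targets : List String) : List Int :=
  targets.foldl (fun answer target =>
    let costs := target.toList.map (costB keymap)
    if costs = [] ∨ costs.contains none then answer ++ [-1]
    else answer ++ [(costs.map (fun o => o.getD 0)).sum]) []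

-- ===== PRECONDITION & SPEC =====
def Spec_solution (keymap : List String) (targets : List String) (out : List Int) : Prop := out = solution_alt keymap targets
instance (keymap : List String) (targets : List String) (out : List Int) : Decidable (Spec_solution keymap targets out) := by unfold Spec_solution; infer_instance

-- ===== CLAIM (what is proved, stated in full; the proofs are below) =====
def Claim_equal_solution : Prop := ∀ (keymap : List String) (targets : List String), Dom_solution keymap targets → Spec_solution keymap targets (solution keymap targets)

-- ===== LEMMAS AND PROOFS =====

-- running minimum combinator on an optional best value
def mo (o : Option Int) (x : Int) : Option Int :=
  some (match o with | none => x | some v => min x v)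

-- first occurrence value of c in a key, as A's dict stores it (index + 1)
def occ (c : Char) (key : String) : Option Int :=
  (PySem.List.index? key.toList c).map (fun k => (k : Int) + 1)

theorem mo_absorb (o : Option Int) (a b : Int) (h : a ≤ b) : mo (mo o a) b = mo o a := by
  cases o <;> simp [mo] <;> omega

theorem get?_stepA (d : PySem.Dict Char Int) (p : Int × Char) (c : Char) :
    (stepA d p).get? c = if p.2 = c then mo (d.get? c) (p.1 + 1) else d.get? c := by
  by_cases h : p.2 = c
  · subst h
    cases hd : d.get? p.2 with
    | none => simp [stepA, hd, PySem.Dict.get?_insert_self, mo]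
    | some v =>
      simp only [stepA, hd]
      split_ifs with hlt
      · simp [PySem.Dict.get?_insert_self, mo]; omega
      · simp [hd, mo]; omega
  · have hne : c ≠ p.2 := fun e => h e.symm
    rw [if_neg h]
    cases hd : d.get? p.2 with
    | none =>
      simp only [stepA, hd]
      rw [PySem.Dict.get?_insert, if_neg hne]
    | some v =>
      simp only [stepA, hd]
      split_ifs with hlt
      · rw [PySem.Dict.get?_insert, if_neg hne]
      · rfl

theorem get?_foldl_stepA (c : Char) (l : List (Int × Char)) (d : PySem.Dict Char Int) :
    (l.foldl stepA d).get? c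
      = l.foldl (fun o p => if p.2 = c then mo o (p.1 + 1) else o) (d.get? c) := by
  induction l generalizing d with
  | nil => rfl
  | cons p t ih => simp only [List.foldl_cons, ih, get?_stepA]

theorem scalar_enumerate (c : Char) (cs : List Char) (s : Int) (o : Option Int) :
    (PySem.List.enumerate cs s).foldl (fun o p => if p.2 = c then mo o (p.1 + 1) else o) o
      = match PySem.List.index? cs c with
        | none => o
        | some k => mo o (s + k + 1) := by
  induction cs generalizing s o with
  | nil => simp [PySem.List.enumerate_nil, PySem.List.index?]
  | cons x t ih =>
    rw [PySem.List.enumerate_cons]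
    simp only [List.foldl_cons]
    by_cases hx : x = c
    · subst hx
      rw [if_pos rfl, ih, PySem.List.index?_cons_self]
      cases hidx : PySem.List.index? t x with
      | none => congr 1; push_cast; ring
      | some k =>
        simp only []
        rw [mo_absorb _ _ _ (by push_cast; omega)]
        congr 1; push_cast; ring
    · rw [if_neg (fun e => hx e), ih, PySem.List.index?_cons_of_ne t hx]
      cases hidx : PySem.List.index? t c with
      | none => simp [hidx]
      | some k => simp only [hidx, Option.map_some]; congr 1; push_cast; ring

theorem get?_buildKeyA (c : Char) (d : PySem.Dict Char Int) (key : String) :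
    (buildKeyA d key).get? c
      = match occ c key with
        | none => d.get? c
        | some x => mo (d.get? c) x := by
  rw [buildKeyA, get?_foldl_stepA, scalar_enumerate]
  cases hidx : PySem.List.index? key.toList c with
  | none => unfold occ; rw [hidx]; rfl
  | some k =>
    unfold occ; rw [hidx]
    show mo (d.get? c) (0 + (k : Int) + 1) = mo (d.get? c) ((k : Int) + 1)
    congr 1; ring

theorem get?_foldl_buildKeyA (c : Char) (ks : List String) (d : PySem.Dict Char Int) :
    ((ks.foldl buildKeyA d).get? c) = (ks.filterMap (occ c)).foldl mo (d.get? c) := by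
  induction ks generalizing d with
  | nil => rfl
  | cons key t ih =>
    simp only [List.foldl_cons, List.filterMap_cons]
    cases hocc : occ c key with
    | none => rw [ih, get?_buildKeyA, hocc]
    | some x => rw [ih, get?_buildKeyA, hocc]; rfl

theorem foldl_mo_some (t : List Int) (a : Int) :
    t.foldl mo (some a) = some (t.foldl min a) := by
  induction t generalizing a with
  | nil => rfl
  | cons x s ih =>
    simp only [List.foldl_cons]
    have h : mo (some a) x = some (min a x) := by simp [mo, min_comm]
    rw [h, ih]

theorem foldl_mo_min? (l : List Int) :
    l.foldl mo none = PySem.List.min? l (fun x => x) := by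
  cases l with
  | nil => rfl
  | cons x t =>
    rw [PySem.List.min?_id_cons]
    simp only [List.foldl_cons]
    have h : mo none x = some x := rfl
    rw [h, foldl_mo_some]

theorem occ_eq_none (c : Char) (key : String)
    (h : PySem.List.index? key.toList c = none) : occ c key = none := by
  unfold occ; rw [h]; rfl

theorem occ_eq_some (c : Char) (key : String) (k : Nat)
    (h : PySem.List.index? key.toList c = some k) : occ c key = some ((k : Int) + 1) := by
  unfold occ; rw [h]; rfl

theorem positions_eq_filterMap (keymap : List String) (c : Char) :
    (keymap.filter (fun key => key.toList.contains c)).map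
        (fun key => ((PySem.List.index? key.toList c).getD 0 : Int) + 1)
      = keymap.filterMap (occ c) := by
  induction keymap with
  | nil => rfl
  | cons key t ih =>
    by_cases hc : c ∈ key.toList
    · have hcont : key.toList.contains c = true := by simpa using hc
      have hsome : (PySem.List.index? key.toList c).isSome := by
        rw [PySem.List.index?_isSome_iff]; exact hc
      obtain ⟨k, hk⟩ := Option.isSome_iff_exists.mp hsome
      simp only [List.filter_cons, hcont, if_true, List.map_cons, List.filterMap_cons,
        occ_eq_some c key k hk, hk, Option.getD_some, ih]
    · have hcont : key.toList.contains c = false := by simpa using hc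
      have hnone : PySem.List.index? key.toList c = none := by
        rw [PySem.List.index?_eq_none_iff]; exact hc
      simp only [List.filter_cons, hcont, Bool.false_eq_true, if_false, List.filterMap_cons,
        occ_eq_none c key hnone, ih]

-- the central bridge: A's dict lookup equals B's direct scan of keymap
theorem get?_index_eq_costB (keymap : List String) (c : Char) :
    (keymap.foldl buildKeyA PySem.Dict.empty).get? c = costB keymap c := by
  rw [get?_foldl_buildKeyA, costB]
  have h : (PySem.Dict.empty : PySem.Dict Char Int).get? c = none := rfl
  rw [h, ← positions_eq_filterMap, foldl_mo_min?]

theorem costB_pos (keymap : List String) (c : Char) (v : Int)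
    (h : costB keymap c = some v) : 1 ≤ v := by
  have hmem := PySem.List.min?_mem h
  simp only [List.mem_map] at hmem
  obtain ⟨key, _, hv⟩ := hmem
  omega

theorem countA_of_missing (d : PySem.Dict Char Int) (cs : List Char)
    (h : ∃ c ∈ cs, d.get? c = none) : ∀ acc, countA d cs acc = 0 := by
  induction cs with
  | nil => simp at h
  | cons c t ih =>
    intro acc
    obtain ⟨c', hc', hn⟩ := h
    cases hg : d.get? c with
    | none => simp [countA, hg]
    | some v =>
      simp only [countA, hg]
      apply ih
      rcases List.mem_cons.mp hc' with rfl | hm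
      · exact absurd hg (by simp [hn])
      · exact ⟨c', hm, hn⟩

theorem countA_of_all (d : PySem.Dict Char Int) (cs : List Char)
    (h : ∀ c ∈ cs, d.get? c ≠ none) :
    ∀ acc, countA d cs acc = acc + (cs.map (fun c => (d.get? c).getD 0)).sum := by
  induction cs with
  | nil => simp [countA]
  | cons c t ih =>
    intro acc
    cases hg : d.get? c with
    | none => exact absurd hg (h c (List.mem_cons_self))
    | some v =>
      simp only [countA, hg]
      rw [ih (fun c' hc' => h c' (List.mem_cons_of_mem _ hc'))]
      simp [hg]
      ring

theorem sum_pos_of_all_pos (l : List Int) (h : ∀ x ∈ l, 1 ≤ x) (hne : l ≠ []) :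
    1 ≤ l.sum := by
  induction l with
  | nil => exact absurd rfl hne
  | cons x t ih =>
    have hx := h x List.mem_cons_self
    have ht : 0 ≤ t.sum := by
      cases t with
      | nil => simp
      | cons y s =>
        have := ih (fun z hz => h z (List.mem_cons_of_mem _ hz)) (by simp)
        omega
    simp only [List.sum_cons]
    omega

theorem per_target (keymap : List String) (t : String) :
    (if countA (keymap.foldl buildKeyA PySem.Dict.empty) t.toList 0 = 0 then (-1 : Int)
     else countA (keymap.foldl buildKeyA PySem.Dict.empty) t.toList 0)
      = (if t.toList.map (costB keymap) = [] ∨ (t.toList.map (costB keymap)).contains none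
         then (-1 : Int)
         else ((t.toList.map (costB keymap)).map (fun o => o.getD 0)).sum) := by
  set d := keymap.foldl buildKeyA PySem.Dict.empty with hd
  have hdc : ∀ c, d.get? c = costB keymap c := fun c => get?_index_eq_costB keymap c
  have hcosts : t.toList.map (costB keymap) = t.toList.map (fun c => d.get? c) :=
    List.map_congr_left (fun c _ => (hdc c).symm)
  rw [hcosts]
  by_cases hmiss : ∃ c ∈ t.toList, d.get? c = none
  · have h0 := countA_of_missing d t.toList hmiss 0
    have hcont : (t.toList.map (fun c => d.get? c)).contains none = true := by
      obtain ⟨c, hc, hn⟩ := hmiss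
      simp only [List.contains_eq_mem, List.mem_map, decide_eq_true_eq]
      exact ⟨c, hc, hn⟩
    rw [h0, if_pos rfl, if_pos (Or.inr hcont)]
  · rw [not_exists] at hmiss
    simp only [not_and] at hmiss
    have hall : ∀ c ∈ t.toList, d.get? c ≠ none := fun c hc => hmiss c hc
    by_cases hnil : t.toList = []
    · rw [hnil]
      simp [countA]
    · have hcnt := countA_of_all d t.toList hall 0
      have hpos : ∀ x ∈ t.toList.map (fun c => (d.get? c).getD 0), 1 ≤ x := by
        intro x hx
        simp only [List.mem_map] at hx
        obtain ⟨c, hc, hv⟩ := hx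
        cases hg : d.get? c with
        | none => exact absurd hg (hall c hc)
        | some v =>
          have h1 := costB_pos keymap c v (by rw [← hdc]; exact hg)
          rw [hg] at hv
          simp at hv
          omega
      have hsum : 1 ≤ (t.toList.map (fun c => (d.get? c).getD 0)).sum := by
        apply sum_pos_of_all_pos _ hpos
        simpa using hnil
      have hcont : (t.toList.map (fun c => d.get? c)).contains none = false := by
        simp only [List.contains_eq_mem, List.mem_map, decide_eq_false_iff_not]
        rintro ⟨c, hc, hn⟩
        exact hall c hc hn
      have hne : t.toList.map (fun c => d.get? c) ≠ [] := by simpa using hnil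
      have hmapmap : (t.toList.map (fun c => d.get? c)).map (fun o => o.getD 0)
          = t.toList.map (fun c => (d.get? c).getD 0) := by
        rw [List.map_map]; rfl
      rw [hcnt, if_neg (by omega),
        if_neg (by
          rintro (h1 | h2)
          · exact hne h1
          · rw [hcont] at h2; exact Bool.false_ne_true h2),
        hmapmap]
      omega

theorem foldl_targets (keymap : List String) (ts : List String) (acc : List Int) :
    ts.foldl (fun answer target =>
        if countA (keymap.foldl buildKeyA PySem.Dict.empty) target.toList 0 = 0
        then answer ++ [-1]
        else answer ++ [countA (keymap.foldl buildKeyA PySem.Dict.empty) target.toList 0]) acc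
      = ts.foldl (fun answer target =>
          if target.toList.map (costB keymap) = [] ∨ (target.toList.map (costB keymap)).contains none
          then answer ++ [-1]
          else answer ++ [((target.toList.map (costB keymap)).map (fun o => o.getD 0)).sum]) acc := by
  induction ts generalizing acc with
  | nil => rfl
  | cons t rest ih =>
    simp only [List.foldl_cons]
    rw [ih]
    have h := per_target keymap t
    congr 1
    split_ifs with h1 h2 h2 <;> simp_all

-- ===== VERDICT (by name: the statement is the Claim_ definition above) =====
theorem solution_spec : Claim_equal_solution := by
  intro keymap targets _
  show solution keymap targets = solution_alt keymap targets
  exact foldl_targets keymap targets []
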